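-- pv_equiv track=rewrite | github.com/mpgossage/advent2025 | day03.py | high_joltage
-- ===== SOURCE A (Python) =====
-- def high_joltage(line):
--     "highest joltage possible"
--     # simple brute force for now
--     high = 0
--     ln = len(line)
--     for i in range(ln):
--         for j in range(i + 1, ln):
--             val = 10 * line[i] + line[j]
--             high = max(val, high)
--     return high
-- ===== SOURCE B (Python) =====
-- def high_joltage(line):
--     "highest joltage possible"
--     # one pass: keep the best 10*line[i] seen so far, combine with current element
--     high = 0
--     best = None  # max of 10*x over elements strictly before the current one
--     for x in line:
--         if best is not None:
--             high = max(best + x, high)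
--             best = max(best, 10 * x)
--         else:
--             best = 10 * x
--     return high
-- ===== Notes on version B (the rewrite author's own statement) =====
-- stated objective: faster
-- what changed: replaced the quadratic all-pairs double loop by a single pass that maintains the running maximum of 10*line[i] over the prefix and combines it with each new element
import Mathlib
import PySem

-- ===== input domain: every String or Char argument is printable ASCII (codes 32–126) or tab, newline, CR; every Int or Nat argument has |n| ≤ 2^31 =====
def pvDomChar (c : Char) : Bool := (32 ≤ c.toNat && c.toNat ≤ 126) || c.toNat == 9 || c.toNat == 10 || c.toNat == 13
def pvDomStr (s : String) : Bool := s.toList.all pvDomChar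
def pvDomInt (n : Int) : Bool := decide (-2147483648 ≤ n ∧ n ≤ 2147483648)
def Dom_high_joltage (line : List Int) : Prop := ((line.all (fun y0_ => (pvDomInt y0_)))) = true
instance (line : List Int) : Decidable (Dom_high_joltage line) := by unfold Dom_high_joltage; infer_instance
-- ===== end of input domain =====

-- B replaces A's quadratic all-pairs double loop by a single pass keeping the running maximum of 10*line[i] over the prefix (objective: faster).

-- ===== PORT A =====
-- literal transliteration of A's nested loops: for i in range(ln): for j in range(i+1, ln): high = max(10*line[i]+line[j], high)
def high_joltage (line : List Int) : Int :=
  let ln : Int := line.length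
  (PySem.List.pyRange 0 ln 1).foldl (fun high i =>
    (PySem.List.pyRange (i + 1) ln 1).foldl (fun high j =>
      max (10 * PySem.List.pyGetD line i 0 + PySem.List.pyGetD line j 0) high) high) 0

-- ===== PORT B =====
-- literal transliteration of Source B's single pass; state = (high, best : Option Int)
def hjAltGo : List Int → Int → Option Int → Int
  | [], high, _ => high
  | x :: xs, high, some best => hjAltGo xs (max (best + x) high) (some (max best (10 * x)))
  | x :: xs, high, none => hjAltGo xs high (some (10 * x))

def high_joltage_alt (line : List Int) : Int := hjAltGo line 0 none

-- ===== PRECONDITION & SPEC =====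
def Spec_high_joltage (line : List Int) (out : Int) : Prop := out = high_joltage_alt line
instance (line : List Int) (out : Int) : Decidable (Spec_high_joltage line out) := by unfold Spec_high_joltage; infer_instance

-- ===== CLAIM (what is proved, stated in full; the proofs are below) =====
def Claim_equal_high_joltage : Prop := ∀ (line : List Int), Dom_high_joltage line → Spec_high_joltage line (high_joltage line)

-- ===== LEMMAS AND PROOFS =====

-- the shape of A's inner loop: fold max (c + y) over ys starting from h
def hjF (c : Int) (ys : List Int) (h : Int) : Int :=
  ys.foldl (fun h y => max (c + y) h) h

-- structural form of A's pair scan: pair x with every later element, then recurse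
def hjPairs : List Int → Int → Int
  | [], h => h
  | x :: xs, h => hjPairs xs (hjF (10 * x) xs h)

lemma hjF_cons (c z : Int) (ys : List Int) (h : Int) :
    hjF c (z :: ys) h = hjF c ys (max (c + z) h) := rfl

lemma hjF_max (c a : Int) (ys : List Int) : ∀ b, hjF c ys (max a b) = max a (hjF c ys b) := by
  induction ys with
  | nil => intro b; simp [hjF]
  | cons z ys ih =>
    intro b
    rw [hjF_cons, hjF_cons, max_left_comm, ih]

lemma hjF_hjF (a b : Int) (ys : List Int) : ∀ h, hjF a ys (hjF b ys h) = hjF (max a b) ys h := by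
  induction ys with
  | nil => intro h; simp [hjF]
  | cons z ys ih =>
    intro h
    calc hjF a (z :: ys) (hjF b (z :: ys) h)
        = hjF a ys (max (a + z) (hjF b ys (max (b + z) h))) := by rw [hjF_cons, hjF_cons]
      _ = hjF a ys (max (a + z) (max (b + z) (hjF b ys h))) := by
            rw [hjF_max b (b + z) ys h]
      _ = hjF a ys (max (max a b + z) (hjF b ys h)) := by
            rw [← max_assoc, max_add_add_right]
      _ = max (max a b + z) (hjF a ys (hjF b ys h)) := by
            rw [hjF_max a (max a b + z) ys (hjF b ys h)]
      _ = max (max a b + z) (hjF (max a b) ys h) := by rw [ih]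
      _ = hjF (max a b) ys (max (max a b + z) h) := by
            rw [hjF_max (max a b) (max a b + z) ys h]
      _ = hjF (max a b) (z :: ys) h := (hjF_cons _ _ _ _).symm

lemma hjGo_eq_pairs (ys : List Int) : ∀ h p, hjAltGo ys h (some p) = hjPairs ys (hjF p ys h) := by
  induction ys with
  | nil => intro h p; simp [hjAltGo, hjPairs, hjF]
  | cons y ys ih =>
    intro h p
    calc hjAltGo (y :: ys) h (some p)
        = hjAltGo ys (max (p + y) h) (some (max p (10 * y))) := rfl
      _ = hjPairs ys (hjF (max p (10 * y)) ys (max (p + y) h)) := ih _ _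
      _ = hjPairs ys (hjF (max (10 * y) p) ys (max (p + y) h)) := by rw [max_comm p]
      _ = hjPairs ys (hjF (10 * y) ys (hjF p ys (max (p + y) h))) := by rw [hjF_hjF]
      _ = hjPairs (y :: ys) (hjF p (y :: ys) h) := by rw [hjPairs, hjF_cons]

-- A with inner loops already rewritten as folds over the list tails
lemma hjA_drop (xs : List Int) : ∀ h : Int,
    (PySem.List.pyRange 0 (xs.length : Int) 1).foldl (fun high i =>
      (xs.drop (i + 1).toNat).foldl (fun high y =>
        max (10 * PySem.List.pyGetD xs i 0 + y) high) high) h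
    = hjPairs xs h := by
  induction xs with
  | nil =>
    intro h
    simp [PySem.List.pyRange_one_eq_nil (by norm_num : (0:Int) ≤ 0), hjPairs]
  | cons x t ih =>
    intro h
    have hlen : ((x :: t).length : Int) = (t.length : Int) + 1 := by
      simp
    rw [hlen, PySem.List.pyRange_one_cons (by positivity), List.foldl_cons]
    -- head step: i = 0 pairs x with all of t
    have hacc : (List.drop ((0:Int) + 1).toNat (x :: t)).foldl (fun high y =>
        max (10 * PySem.List.pyGetD (x :: t) 0 0 + y) high) h = hjF (10 * x) t h := by
      simp [hjF, PySem.List.pyGetD_zero_cons]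
    rw [hacc]
    -- tail: shift indices by one and use the IH on t
    rw [show ((0:Int) + 1) = 1 by norm_num, PySem.List.pyRange_one 1 ((t.length : Int) + 1)]
    have hn : (((t.length : Int) + 1 - 1)).toNat = t.length := by omega
    rw [hn, List.foldl_map]
    have hbody : ∀ (acc : Int), ∀ k ∈ List.range t.length,
        (List.drop (((1:Int) + (k : Int)) + 1).toNat (x :: t)).foldl (fun high y =>
          max (10 * PySem.List.pyGetD (x :: t) (1 + (k : Int)) 0 + y) high) acc
        = (List.drop (((k : Int)) + 1).toNat t).foldl (fun high y =>
          max (10 * PySem.List.pyGetD t (k : Int) 0 + y) high) acc := by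
      intro acc k hk
      have e1 : ((1:Int) + (k : Int)) = ((k + 1 : Nat) : Int) := by push_cast; ring
      have e2 : (((1:Int) + (k : Int)) + 1).toNat = k + 2 := by omega
      have e3 : (((k : Int)) + 1).toNat = k + 1 := by omega
      rw [e2, e3, e1, PySem.List.pyGetD_natCast, PySem.List.pyGetD_natCast,
        List.getD_cons_succ, List.drop_succ_cons]
    rw [PySem.List.foldl_congr_mem _ _ _ _ hbody]
    have hr : PySem.List.pyRange 0 (t.length : Int) 1 =
        (List.range t.length).map (fun (k : Nat) => ((k : Int))) := by
      rw [PySem.List.pyRange_one 0 (t.length : Int),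
        show (((t.length : Int)) - 0).toNat = t.length by omega]
      exact List.map_congr_left (fun k _ => zero_add _)
    rw [hr] at ih
    exact (List.foldl_map).symm.trans (ih (hjF (10 * x) t h))

lemma hjA_eq_pairs (xs : List Int) :
    high_joltage xs = hjPairs xs 0 := by
  unfold high_joltage
  rw [← hjA_drop xs 0]
  apply PySem.List.foldl_congr_mem
  intro acc i hi
  have h0 : 0 ≤ i := ((PySem.List.mem_pyRange_one).1 hi).1
  exact PySem.List.foldl_pyRange_pyGetD' xs 0
    (fun high y => max (10 * PySem.List.pyGetD xs i 0 + y) high) acc (by omega)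

-- ===== VERDICT (by name: the statement is the Claim_ definition above) =====
theorem high_joltage_spec : Claim_equal_high_joltage := by
  intro line _
  unfold Spec_high_joltage high_joltage_alt
  rw [hjA_eq_pairs]
  cases line with
  | nil => rfl
  | cons x xs =>
    show hjPairs (x :: xs) 0 = hjAltGo xs 0 (some (10 * x))
    rw [hjGo_eq_pairs, hjPairs]
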